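-- pv_equiv track=rewrite | github.com/Sarenard/Foggy | visual/serveur/server.py | build_leaderboard_payload
-- ===== SOURCE A (Python) =====
-- def build_leaderboard_payload(cells):
--     active_cells = [cell for cell in cells if cell["editState"] != 2]
--     return {
--         "activeCells": len(active_cells),
--         "totalCells": len(cells),
--         "normalCells": sum(1 for cell in cells if cell["editState"] == 0),
--         "addedCells": sum(1 for cell in cells if cell["editState"] == 1),
--         "removedCells": sum(1 for cell in cells if cell["editState"] == 2),
--     }
-- ===== SOURCE B (Python) =====
-- def build_leaderboard_payload(cells):
--     normal = added = removed = 0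
--     for cell in cells:
--         s = cell["editState"]
--         if s == 0:
--             normal += 1
--         elif s == 1:
--             added += 1
--         elif s == 2:
--             removed += 1
--     total = len(cells)
--     return {
--         "activeCells": total - removed,
--         "totalCells": total,
--         "normalCells": normal,
--         "addedCells": added,
--         "removedCells": removed,
--     }
-- ===== Notes on version B (the rewrite author's own statement) =====
-- stated objective: simpler
-- what changed: Replaces A's four separate scans (a filter list plus three generator sums) by one pass keeping three counters and deriving activeCells as total - removed.
-- outside the precondition, e.g. on build_leaderboard_payload([{}]): A raises KeyError, B raises KeyError
import Mathlib
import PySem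

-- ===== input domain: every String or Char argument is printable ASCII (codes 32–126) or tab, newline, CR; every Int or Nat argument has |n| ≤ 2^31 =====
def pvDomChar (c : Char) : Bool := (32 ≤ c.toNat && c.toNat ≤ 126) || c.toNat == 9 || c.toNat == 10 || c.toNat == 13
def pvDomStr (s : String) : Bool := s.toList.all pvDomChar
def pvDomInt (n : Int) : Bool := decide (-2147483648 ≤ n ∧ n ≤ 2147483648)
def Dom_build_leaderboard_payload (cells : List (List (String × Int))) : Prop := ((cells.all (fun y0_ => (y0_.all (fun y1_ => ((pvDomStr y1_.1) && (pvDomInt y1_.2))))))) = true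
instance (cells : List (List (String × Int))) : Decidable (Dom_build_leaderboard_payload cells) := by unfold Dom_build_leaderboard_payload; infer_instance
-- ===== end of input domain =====

-- B is a single-pass re-decomposition of A (one loop, three counters) — same return value on Pre_.

-- cell["editState"]: total form of the dict lookup; exact under Pre_ (the key is present)
def getES (cell : List (String × Int)) : Int :=
  PySem.Dict.getD (PySem.Dict.mk cell) "editState" 0

-- ===== PORT A =====
def build_leaderboard_payload (cells : List (List (String × Int))) : List (String × Int) :=
  let active_cells := cells.filter (fun cell => getES cell ≠ 2)
  [("activeCells", PySem.List.len active_cells),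
   ("totalCells", PySem.List.len cells),
   ("normalCells", (cells.map (fun cell => if getES cell = 0 then (1 : Int) else 0)).sum),
   ("addedCells", (cells.map (fun cell => if getES cell = 1 then (1 : Int) else 0)).sum),
   ("removedCells", (cells.map (fun cell => if getES cell = 2 then (1 : Int) else 0)).sum)]

-- ===== PORT B =====
def build_leaderboard_payload_alt (cells : List (List (String × Int))) : List (String × Int) :=
  let c := cells.foldl (fun (acc : Int × Int × Int) cell =>
      let s := getES cell
      if s = 0 then (acc.1 + 1, acc.2.1, acc.2.2)
      else if s = 1 then (acc.1, acc.2.1 + 1, acc.2.2)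
      else if s = 2 then (acc.1, acc.2.1, acc.2.2 + 1)
      else acc) (0, 0, 0)
  let total := PySem.List.len cells
  [("activeCells", total - c.2.2),
   ("totalCells", total),
   ("normalCells", c.1),
   ("addedCells", c.2.1),
   ("removedCells", c.2.2)]

-- ===== PRECONDITION & SPEC =====
-- Pre_ excludes cells missing the "editState" key, on which Python A raises KeyError.
def Pre_build_leaderboard_payload (cells : List (List (String × Int))) : Prop :=
  (cells.all (fun cell => (PySem.Dict.mk cell).contains "editState")) = true
instance (cells : List (List (String × Int))) : Decidable (Pre_build_leaderboard_payload cells) := by unfold Pre_build_leaderboard_payload; infer_instance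
def pvWitness_build_leaderboard_payload : (List (List (String × Int))) := [[("editState", 0)], [("editState", 2)]]
def Spec_build_leaderboard_payload (cells : List (List (String × Int))) (out : List (String × Int)) : Prop := out = build_leaderboard_payload_alt cells
instance (cells : List (List (String × Int))) (out : List (String × Int)) : Decidable (Spec_build_leaderboard_payload cells out) := by unfold Spec_build_leaderboard_payload; infer_instance

-- ===== CLAIM (what is proved, stated in full; the proofs are below) =====
def Claim_equal_build_leaderboard_payload : Prop := ∀ (cells : List (List (String × Int))), Dom_build_leaderboard_payload cells → Pre_build_leaderboard_payload cells → Spec_build_leaderboard_payload cells (build_leaderboard_payload cells)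

-- ===== LEMMAS AND PROOFS =====

-- B's fold computes the three counts, shifted by the initial accumulator.
lemma foldl_counts (cells : List (List (String × Int))) (n a r : Int) :
    cells.foldl (fun (acc : Int × Int × Int) cell =>
      let s := getES cell
      if s = 0 then (acc.1 + 1, acc.2.1, acc.2.2)
      else if s = 1 then (acc.1, acc.2.1 + 1, acc.2.2)
      else if s = 2 then (acc.1, acc.2.1, acc.2.2 + 1)
      else acc) (n, a, r)
    = (n + (cells.countP (fun c => getES c = 0) : Int),
       a + (cells.countP (fun c => getES c = 1) : Int),
       r + (cells.countP (fun c => getES c = 2) : Int)) := by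
  induction cells generalizing n a r with
  | nil => simp
  | cons c cs ih =>
    simp only [List.foldl_cons, List.countP_cons]
    split_ifs with h0 h1 h2 <;> simp_all [Prod.ext_iff] <;> omega

lemma countP_ne_two (cells : List (List (String × Int))) :
    ((cells.filter (fun c => !decide (getES c = 2))).length : Int)
      = (cells.length : Int) - (cells.countP (fun c => getES c = 2) : Int) := by
  induction cells with
  | nil => simp
  | cons c cs ih =>
    by_cases h : getES c = 2 <;> simp [h, ih]; omega

-- ===== VERDICT (by name: the statement is the Claim_ definition above) =====
theorem build_leaderboard_payload_spec : Claim_equal_build_leaderboard_payload := by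
  intro cells _ _
  unfold Spec_build_leaderboard_payload build_leaderboard_payload build_leaderboard_payload_alt
  rw [foldl_counts]
  have hs : ∀ (k : Int), (List.map (fun cell => if getES cell = k then (1 : Int) else 0) cells).sum
      = (List.countP (fun c => decide (getES c = k)) cells : Int) := by
    intro k
    rw [← PySem.List.sum_map_ite_one_zero (fun c => decide (getES c = k)) cells]
    simp
  simp [PySem.List.len_eq, hs, countP_ne_two]
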